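-- pv_equiv track=rewrite | github.com/SecretPasta/Python_FirstYear | Questoions/q3.py | ranger
-- ===== SOURCE A (Python) =====
-- def ranger(A):
--     supA = []
--     infA = []
--     i = 0
--     supA.append(A[i])
--     while (i<len(A)-1):
--        if not ((A[i]+1)==A[i+1]):
--            infA.append(A[i])
--            i+=1
--            supA.append(A[i])
--        else:
--            i+=1
--     infA.append(A[i])
--     return  [supA,infA]
-- ===== SOURCE B (Python) =====
-- def ranger(A):
--     # build both lists back-to-front in reversed order, then flip once
--     starts = [A[-1]]
--     ends = [A[-1]]
--     for k in range(len(A) - 2, -1, -1):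
--         x = A[k]
--         if x + 1 != A[k + 1]:
--             starts.append(x)
--             ends.append(x)
--         else:
--             starts[-1] = x
--     starts.reverse()
--     ends.reverse()
--     return [starts, ends]
-- ===== Notes on version B (the rewrite author's own statement) =====
-- stated objective: alternative
-- what changed: Replaces A's forward while-loop that appends run boundaries to both lists as it walks with a backward traversal that builds both lists in reversed order (appending at breaks, overwriting the last start inside a run) and flips them once at the end.
import Mathlib
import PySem

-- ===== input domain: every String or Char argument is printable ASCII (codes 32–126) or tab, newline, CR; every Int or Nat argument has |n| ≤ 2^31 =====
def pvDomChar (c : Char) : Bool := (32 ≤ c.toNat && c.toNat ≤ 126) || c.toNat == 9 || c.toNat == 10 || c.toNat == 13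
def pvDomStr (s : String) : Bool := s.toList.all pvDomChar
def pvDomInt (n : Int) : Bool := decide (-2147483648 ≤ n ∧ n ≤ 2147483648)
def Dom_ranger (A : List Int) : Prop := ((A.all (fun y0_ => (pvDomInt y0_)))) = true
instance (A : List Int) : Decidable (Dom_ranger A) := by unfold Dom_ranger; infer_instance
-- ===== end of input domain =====

-- B replaces A's forward interleaved while-loop with a backward traversal that builds
-- both lists in reversed order and flips them once at the end (alternative, same cost).


-- ===== PORT A =====
-- A's while loop: state (i, supA, infA); `rem = len(A)-1-i` counts the remaining
-- iterations (rem = 0 ↔ the guard i < len(A)-1 fails), so the loop is structural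
-- recursion on rem; when it stops, the final `infA.append(A[i])` and the return happen.
def rangerLoop (A : List Int) : Nat → Nat → List Int → List Int → List (List Int)
  | 0, i, supA, infA => [supA, infA ++ [A.getD i 0]]
  | rem + 1, i, supA, infA =>
      if ¬ (A.getD i 0 + 1 = A.getD (i + 1) 0) then
        rangerLoop A rem (i + 1) (supA ++ [A.getD (i + 1) 0]) (infA ++ [A.getD i 0])
      else
        rangerLoop A rem (i + 1) supA infA

def ranger (A : List Int) : List (List Int) :=
  rangerLoop A (A.length - 1) 0 [A.getD 0 0] []

-- ===== PORT B =====
-- B's backward loop `for k in range(len(A)-2, -1, -1)`: fold over the reversed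
-- index range with state (starts, ends), both kept in reversed order; the in-place
-- `starts[-1] = x` is dropLast ++ [x]; the final `.reverse()` calls flip both lists.
def ranger_alt (A : List Int) : List (List Int) :=
  let last := A.getD (A.length - 1) 0
  let st := ((List.range (A.length - 1)).reverse).foldl
    (fun st k =>
      let x := A.getD k 0
      if x + 1 ≠ A.getD (k + 1) 0 then (st.1 ++ [x], st.2 ++ [x])
      else (st.1.dropLast ++ [x], st.2))
    ([last], [last])
  [st.1.reverse, st.2.reverse]

-- ===== PRECONDITION & SPEC =====
-- Pre excludes only the empty list, on which Python A raises IndexError at its first subscript.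
def Pre_ranger (A : List Int) : Prop := A ≠ []
instance (A : List Int) : Decidable (Pre_ranger A) := by unfold Pre_ranger; infer_instance
def pvWitness_ranger : List Int := [1, 2, 5]

def Spec_ranger (A : List Int) (out : List (List Int)) : Prop := out = ranger_alt A
instance (A : List Int) (out : List (List Int)) : Decidable (Spec_ranger A out) := by unfold Spec_ranger; infer_instance

-- ===== CLAIM (what is proved, stated in full; the proofs are below) =====
def Claim_equal_ranger : Prop := ∀ (A : List Int), Dom_ranger A → Pre_ranger A → Spec_ranger A (ranger A)

-- ===== LEMMAS AND PROOFS =====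

-- the breakpoint predicate and the closed-form starts/ends from position i
def pvBr (A : List Int) (j : Nat) : Bool := ¬ (A.getD j 0 + 1 = A.getD (j + 1) 0)

def pvStarts (A : List Int) (i : Nat) : List Int :=
  A.getD i 0 :: ((List.range' i (A.length - 1 - i)).filter (pvBr A)).map (fun j => A.getD (j + 1) 0)

def pvEnds (A : List Int) (i : Nat) : List Int :=
  ((List.range' i (A.length - 1 - i)).filter (pvBr A)).map (fun j => A.getD j 0)
    ++ [A.getD (A.length - 1) 0]

-- A's loop invariant: from position i it appends exactly what the breakpoints dictate.
theorem rangerLoop_eq (A : List Int) (k : Nat) (i : Nat) (supA infA : List Int)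
    (hi : i ≤ A.length - 1) (hk : A.length - 1 - i = k) :
    rangerLoop A k i supA infA =
      [supA ++ (pvStarts A i).tail, infA ++ pvEnds A i] := by
  induction k generalizing i supA infA with
  | zero =>
      have hieq : i = A.length - 1 := by omega
      simp [rangerLoop, pvStarts, pvEnds, hieq]
  | succ k ih =>
      have hlt : i < A.length - 1 := by omega
      have hr : List.range' i (A.length - 1 - i) = i :: List.range' (i + 1) k := by
        rw [hk]; simp [List.range'_succ]
      have hk' : A.length - 1 - (i + 1) = k := by omega
      rw [rangerLoop]
      by_cases hb : A.getD i 0 + 1 = A.getD (i + 1) 0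
      · simp only [hb, not_true_eq_false, if_false]
        rw [ih (i + 1) supA infA (by omega) hk']
        simp only [List.getD] at hb
        simp [pvStarts, pvEnds, hr, hk', pvBr, hb]
      · simp only [hb, not_false_eq_true, if_pos]
        rw [ih (i + 1) (supA ++ [A.getD (i + 1) 0]) (infA ++ [A.getD i 0]) (by omega) hk']
        simp only [List.getD] at hb
        simp [pvStarts, pvEnds, hr, hk', pvBr, hb]

-- B's loop invariant: folding the reversed indices from i up produces the reversed
-- closed-form starts/ends for position i.
theorem ranger_alt_fold_eq (A : List Int) (i : Nat) (hi : i ≤ A.length - 1) :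
    ((List.range' i (A.length - 1 - i)).reverse).foldl
      (fun st k =>
        let x := A.getD k 0
        if x + 1 ≠ A.getD (k + 1) 0 then (st.1 ++ [x], st.2 ++ [x])
        else (st.1.dropLast ++ [x], st.2))
      ([A.getD (A.length - 1) 0], [A.getD (A.length - 1) 0])
    = ((pvStarts A i).reverse, (pvEnds A i).reverse) := by
  obtain ⟨k, hk⟩ : ∃ k, A.length - 1 - i = k := ⟨_, rfl⟩
  induction k generalizing i with
  | zero =>
      have hieq : i = A.length - 1 := by omega
      simp [pvStarts, pvEnds, hieq]
  | succ k ih =>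
      have hlt : i < A.length - 1 := by omega
      have hr : List.range' i (A.length - 1 - i) = i :: List.range' (i + 1) k := by
        rw [hk]; simp [List.range'_succ]
      have hk' : A.length - 1 - (i + 1) = k := by omega
      rw [hr, List.reverse_cons, List.foldl_append]
      have h2 := ih (i + 1) (by omega) hk'
      rw [hk'] at h2
      rw [h2]
      by_cases hb : A.getD i 0 + 1 = A.getD (i + 1) 0
      · have hb' := hb; simp only [List.getD] at hb'
        simp [pvStarts, pvEnds, hr, hk', pvBr, hb']
      · have hb' := hb; simp only [List.getD] at hb'
        simp [pvStarts, pvEnds, hr, hk', pvBr, hb']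

-- ===== VERDICT (by name: the statement is the Claim_ definition above) =====
theorem ranger_spec : Claim_equal_ranger := by
  intro A _ hpre
  unfold Spec_ranger ranger ranger_alt
  rw [rangerLoop_eq A (A.length - 1) 0 [A.getD 0 0] [] (by omega) (by omega)]
  have h := ranger_alt_fold_eq A 0 (by omega)
  simp only [Nat.sub_zero] at h
  simp only [List.range_eq_range']
  rw [h]
  simp [pvStarts]
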